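-- pv_equiv track=rewrite | github.com/ljunior23/zero-shot-braille-to-speech-system | inference/unified_server.py | cluster_dots_into_cells
-- ===== SOURCE A (Python) =====
-- def cluster_dots_into_cells(dots: list, cell_width: int = 30, cell_height: int = 40) -> list:
--     """Cluster dots into Braille cells."""
--     if not dots:
--         return []
--
--     # Sort dots by x-coordinate
--     dots_sorted = sorted(dots, key=lambda d: d[0])
--
--     # Group into columns (cells)
--     cells = []
--     current_cell = []
--     last_x = dots_sorted[0][0] if dots_sorted else 0
--
--     for dot in dots_sorted:
--         x, y = dot
--         # New cell if gap > cell_width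
--         if x - last_x > cell_width:
--             if current_cell:
--                 cells.append(current_cell)
--             current_cell = [dot]
--         else:
--             current_cell.append(dot)
--         last_x = x
--
--     if current_cell:
--         cells.append(current_cell)
--
--     return cells
-- ===== SOURCE B (Python) =====
-- def cluster_dots_into_cells(dots: list, cell_width: int = 30, cell_height: int = 40) -> list:
--     """Cluster dots into Braille cells: sort by x, find break indices where the
--     adjacent x-gap exceeds cell_width, then slice the sorted list at those breaks."""
--     if not dots:
--         return []
--     ds = sorted(dots, key=lambda d: d[0])
--     xs = [d[0] for d in ds]
--     n = len(ds)
--     breaks = [i for i in range(1, n) if xs[i] - xs[i - 1] > cell_width]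
--     bounds = [0] + breaks + [n]
--     return [ds[a:b] for a, b in zip(bounds, bounds[1:])]
-- ===== Notes on version B (the rewrite author's own statement) =====
-- stated objective: alternative
-- what changed: Replaces A's stateful accumulator loop (current_cell/last_x with conditional flushes) by computing the break indices where the adjacent x-gap exceeds cell_width and slicing the sorted list between consecutive boundaries.
import Mathlib
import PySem

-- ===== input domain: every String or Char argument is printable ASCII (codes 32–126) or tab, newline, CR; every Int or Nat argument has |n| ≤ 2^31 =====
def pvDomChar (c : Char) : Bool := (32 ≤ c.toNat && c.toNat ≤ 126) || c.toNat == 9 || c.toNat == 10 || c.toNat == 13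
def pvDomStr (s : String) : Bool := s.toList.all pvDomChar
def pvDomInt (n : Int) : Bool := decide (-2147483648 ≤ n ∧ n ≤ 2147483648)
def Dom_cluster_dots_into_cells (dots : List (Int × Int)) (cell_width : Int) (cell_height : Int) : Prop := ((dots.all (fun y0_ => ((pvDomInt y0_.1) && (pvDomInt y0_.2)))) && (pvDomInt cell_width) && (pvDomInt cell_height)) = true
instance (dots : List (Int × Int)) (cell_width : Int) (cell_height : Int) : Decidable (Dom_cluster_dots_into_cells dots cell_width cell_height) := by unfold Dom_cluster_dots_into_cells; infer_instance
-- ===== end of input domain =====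

-- B replaces A's stateful accumulator loop by computing break indices where the adjacent
-- x-gap exceeds cell_width and slicing the sorted list between consecutive boundaries
-- (objective: alternative decomposition, same cost).

-- ===== PORT A =====
-- one loop step of A: state = (cells, current_cell, last_x)
def pvStepA (cw : Int)
    (s : List (List (Int × Int)) × List (Int × Int) × Int) (dot : Int × Int) :
    List (List (Int × Int)) × List (Int × Int) × Int :=
  match s with
  | (cells, cur, lastx) =>
    if dot.1 - lastx > cw then
      ((if cur ≠ [] then cells ++ [cur] else cells), [dot], dot.1)
    else
      (cells, cur ++ [dot], dot.1)

def cluster_dots_into_cells (dots : List (Int × Int)) (cell_width : Int) (cell_height : Int) : List (List (Int × Int)) :=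
  if dots = [] then []
  else
    let ds := PySem.List.sorted dots (fun d => d.1) false
    -- "dots_sorted[0][0] if dots_sorted else 0"
    let last_x : Int := match ds with | [] => 0 | d :: _ => d.1
    let st := ds.foldl (pvStepA cell_width) ([], [], last_x)
    if st.2.1 ≠ [] then st.1 ++ [st.2.1] else st.1

-- ===== PORT B =====
def cluster_dots_into_cells_alt (dots : List (Int × Int)) (cell_width : Int) (cell_height : Int) : List (List (Int × Int)) :=
  if dots = [] then []
  else
    let ds := PySem.List.sorted dots (fun d => d.1) false
    let xs := ds.map (fun d => d.1)
    let n : Int := ds.length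
    let breaks := (PySem.List.pyRange 1 n 1).filter
      (fun i => PySem.List.pyGetD xs i 0 - PySem.List.pyGetD xs (i - 1) 0 > cell_width)
    let bounds := 0 :: breaks ++ [n]
    -- zip(bounds, bounds[1:]); every index used lies in [0, n], where slice is exact
    (bounds.zip (PySem.List.slice bounds (some 1) none)).map
      (fun p => PySem.List.slice ds (some p.1) (some p.2))

-- ===== PRECONDITION & SPEC =====
def Spec_cluster_dots_into_cells (dots : List (Int × Int)) (cell_width : Int) (cell_height : Int) (out : List (List (Int × Int))) : Prop := out = cluster_dots_into_cells_alt dots cell_width cell_height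
instance (dots : List (Int × Int)) (cell_width : Int) (cell_height : Int) (out : List (List (Int × Int))) : Decidable (Spec_cluster_dots_into_cells dots cell_width cell_height out) := by unfold Spec_cluster_dots_into_cells; infer_instance

-- ===== CLAIM (what is proved, stated in full; the proofs are below) =====
def Claim_equal_cluster_dots_into_cells : Prop := ∀ (dots : List (Int × Int)) (cell_width : Int) (cell_height : Int), Dom_cluster_dots_into_cells dots cell_width cell_height → Spec_cluster_dots_into_cells dots cell_width cell_height (cluster_dots_into_cells dots cell_width cell_height)

-- ===== LEMMAS AND PROOFS =====

-- x-coordinate of the first dot of a cell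
def pvHeadx (c : List (Int × Int)) : Int := (c.headD (0, 0)).1

-- reference: grouping by adjacent gap, as a right fold
def pvChunks (cw : Int) : List (Int × Int) → List (List (Int × Int))
  | [] => []
  | d :: t =>
    match pvChunks cw t with
    | [] => [[d]]
    | c :: cs => if pvHeadx c - d.1 > cw then [d] :: c :: cs else (d :: c) :: cs

lemma pvChunks_cons_step (cw : Int) (a : Int × Int) (l : List (Int × Int)) :
    pvChunks cw (a :: l) =
      (match pvChunks cw l with
       | [] => [[a]]
       | c :: cs => if pvHeadx c - a.1 > cw then [a] :: c :: cs else (a :: c) :: cs) := by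
  simp only [pvChunks]

lemma pvChunks_cons_shape (cw : Int) (d : Int × Int) (t : List (Int × Int)) :
    ∃ r cs, pvChunks cw (d :: t) = (d :: r) :: cs := by
  cases h : pvChunks cw t with
  | nil => exact ⟨[], [], by simp [pvChunks, h]⟩
  | cons c cs =>
    by_cases hc : pvHeadx c - d.1 > cw
    · refine ⟨[], c :: cs, ?_⟩
      simp only [pvChunks, h]
      rw [if_pos hc]
    · refine ⟨c, cs, ?_⟩
      simp only [pvChunks, h]
      rw [if_neg hc]

-- A's loop, after the first element, as a recursion
def pvGoA (cw : Int) (cur : List (Int × Int)) (lastx : Int) :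
    List (Int × Int) → List (List (Int × Int))
  | [] => [cur]
  | d :: t =>
    if d.1 - lastx > cw then cur :: pvGoA cw [d] d.1 t else pvGoA cw (cur ++ [d]) d.1 t

lemma pvFoldA (cw : Int) :
    ∀ (l : List (Int × Int)) (cells : List (List (Int × Int))) (cur : List (Int × Int))
      (lastx : Int), cur ≠ [] →
    (let st := l.foldl (pvStepA cw) (cells, cur, lastx)
     if st.2.1 ≠ [] then st.1 ++ [st.2.1] else st.1) = cells ++ pvGoA cw cur lastx l := by
  intro l
  induction l with
  | nil => intro cells cur lastx h; simp [pvGoA, h]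
  | cons d t ih =>
    intro cells cur lastx h
    simp only [List.foldl_cons, pvStepA, pvGoA]
    by_cases hc : d.1 - lastx > cw
    · rw [if_pos hc, if_pos hc, if_pos h]
      rw [ih (cells ++ [cur]) [d] d.1 (by simp)]
      simp
    · rw [if_neg hc, if_neg hc]
      exact ih cells (cur ++ [d]) d.1 (by simp)

lemma pvGoA_merge (cw : Int) :
    ∀ (l : List (Int × Int)) (cur : List (Int × Int)) (lastx : Int),
    pvGoA cw cur lastx l =
      (match pvChunks cw l with
       | [] => [cur]
       | c :: cs => if pvHeadx c - lastx > cw then cur :: c :: cs else (cur ++ c) :: cs) := by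
  intro l
  induction l with
  | nil => intro cur lastx; simp [pvGoA, pvChunks]
  | cons d t ih =>
    intro cur lastx
    obtain ⟨r, cs, hsh⟩ := pvChunks_cons_shape cw d t
    have hchd : pvGoA cw [d] d.1 t = pvChunks cw (d :: t) := by
      rw [ih [d] d.1]
      cases hT : pvChunks cw t with
      | nil => simp [pvChunks, hT]
      | cons c cs' =>
        simp only [pvChunks, hT]
        by_cases hc : pvHeadx c - d.1 > cw
        · rw [if_pos hc, if_pos hc]
        · rw [if_neg hc, if_neg hc]; simp
    rw [hsh]
    simp only [pvGoA, pvHeadx, List.headD_cons]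
    by_cases hc : d.1 - lastx > cw
    · rw [if_pos hc, if_pos hc, hchd, hsh]
    · rw [if_neg hc, if_neg hc]
      rw [ih (cur ++ [d]) d.1]
      cases hT : pvChunks cw t with
      | nil =>
        have : pvChunks cw (d :: t) = [[d]] := by simp [pvChunks, hT]
        rw [this] at hsh
        injection hsh with h1 h2
        injection h1 with h1a h1b
        subst h2
        simp [← h1b]
      | cons c cs' =>
        have hdt : pvChunks cw (d :: t) =
            (if pvHeadx c - d.1 > cw then [d] :: c :: cs' else (d :: c) :: cs') := by
          simp [pvChunks, hT]
        rw [hdt] at hsh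
        by_cases hc2 : pvHeadx c - d.1 > cw
        · rw [if_pos hc2] at hsh
          simp only [hT]
          rw [if_pos hc2]
          injection hsh with h1 h2
          injection h1 with h1a h1b
          subst h2
          simp [← h1b]
        · rw [if_neg hc2] at hsh
          simp only [hT]
          rw [if_neg hc2]
          injection hsh with h1 h2
          injection h1 with h1a h1b
          subst h2
          simp [← h1b]

lemma pvA_eq_chunks (cw : Int) (d : Int × Int) (t : List (Int × Int)) :
    (let st := (d :: t).foldl (pvStepA cw) ([], [], d.1)
     if st.2.1 ≠ [] then st.1 ++ [st.2.1] else st.1) = pvChunks cw (d :: t) := by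
  have hfirst : pvStepA cw ([], [], d.1) d = ([], [d], d.1) := by
    simp [pvStepA]
  simp only [List.foldl_cons, hfirst]
  rw [pvFoldA cw t [] [d] d.1 (by simp)]
  rw [pvGoA_merge]
  cases hT : pvChunks cw t with
  | nil => simp [pvChunks, hT]
  | cons c cs =>
    simp only [pvChunks, hT, List.nil_append]
    by_cases hc : pvHeadx c - d.1 > cw
    · rw [if_pos hc, if_pos hc]
    · rw [if_neg hc, if_neg hc]; simp

-- ---- B side ----

-- Nat-level break indices of ds, shifted down by one (k stands for Python's i = k + 1)
def pvNbrk (cw : Int) (ds : List (Int × Int)) : List Nat :=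
  (List.range (ds.length - 1)).filter
    (fun k => (ds.map (fun d => d.1)).getD (k + 1) 0 - (ds.map (fun d => d.1)).getD k 0 > cw)

-- Nat-level slicing along a bounds list
def pvSlices (ds : List (Int × Int)) (bs : List Nat) : List (List (Int × Int)) :=
  (bs.zip bs.tail).map (fun p => (ds.drop p.1).take (p.2 - p.1))

lemma pvSlices_shift (d : Int × Int) (t : List (Int × Int)) (bs : List Nat) :
    pvSlices (d :: t) (bs.map (· + 1)) = pvSlices t bs := by
  induction bs with
  | nil => simp [pvSlices]
  | cons a rest ih =>
    cases rest with
    | nil => simp [pvSlices]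
    | cons b rs =>
      simp only [pvSlices, List.map_cons, List.tail_cons, List.zip_cons_cons, List.map_cons] at *
      congr 1
      · rw [List.drop_succ_cons]
        congr 1
        omega

lemma pvSlices_consHead (d : Int × Int) (t : List (Int × Int)) (b : Nat) (rs : List Nat) :
    pvSlices (d :: t) (0 :: (b :: rs).map (· + 1)) =
      (d :: ((t.drop 0).take b)) :: pvSlices t (b :: rs) := by
  have hsh := pvSlices_shift d t (b :: rs)
  simp only [pvSlices, List.map_cons, List.tail_cons, List.zip_cons_cons, List.map_cons] at *
  congr 1

lemma pvNbrk_cons (cw : Int) (d e : Int × Int) (t : List (Int × Int)) :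
    pvNbrk cw (d :: e :: t) =
      (if e.1 - d.1 > cw then 0 :: (pvNbrk cw (e :: t)).map (· + 1)
       else (pvNbrk cw (e :: t)).map (· + 1)) := by
  unfold pvNbrk
  simp only [List.length_cons, Nat.add_sub_cancel]
  rw [List.range_succ_eq_map, List.filter_cons]
  simp only [List.map_cons, List.getD_cons_succ, List.getD_cons_zero, List.filter_map]
  by_cases hc : e.1 - d.1 > cw
  · rw [if_pos (by simpa using hc), if_pos hc]
    simp [Function.comp_def]
  · rw [if_neg (by simpa using hc), if_neg hc]
    simp [Function.comp_def]

lemma pvSlices_eq_chunks (cw : Int) :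
    ∀ (t : List (Int × Int)) (d : Int × Int),
    pvSlices (d :: t) (0 :: (pvNbrk cw (d :: t)).map (· + 1) ++ [(d :: t).length]) =
      pvChunks cw (d :: t) := by
  intro t
  induction t with
  | nil =>
    intro d
    simp [pvNbrk, pvSlices, pvChunks]
  | cons e t' ih =>
    intro d
    rw [pvNbrk_cons]
    obtain ⟨r, cs, hsh⟩ := pvChunks_cons_shape cw e t'
    have hdce : pvChunks cw (d :: e :: t') =
        (if pvHeadx (e :: r) - d.1 > cw then [d] :: (e :: r) :: cs else (d :: e :: r) :: cs) := by
      rw [pvChunks_cons_step, hsh]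
    have hx : pvHeadx (e :: r) = e.1 := by simp [pvHeadx]
    by_cases hc : e.1 - d.1 > cw
    · rw [if_pos hc]
      have hb : ((0 : Nat) :: (0 :: (pvNbrk cw (e :: t')).map (· + 1)).map (· + 1)
            ++ [(d :: e :: t').length])
          = 0 :: ((0 :: ((pvNbrk cw (e :: t')).map (· + 1) ++ [(e :: t').length])).map (· + 1)) := by
        simp [List.map_map, Function.comp_def]
      rw [hb, pvSlices_consHead d (e :: t') 0 ((pvNbrk cw (e :: t')).map (· + 1) ++ [(e :: t').length])]
      have hih := ih e
      rw [List.cons_append] at hih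
      rw [hih, hdce, if_pos (by rw [hx]; exact hc)]
      simp [hsh]
    · rw [if_neg hc]
      have key : ((0 : Nat) :: ((pvNbrk cw (e :: t')).map (· + 1)).map (· + 1)
            ++ [(d :: e :: t').length])
          = 0 :: (((pvNbrk cw (e :: t')).map (· + 1) ++ [(e :: t').length]).map (· + 1)) := by
        simp [List.map_map, Function.comp_def]
      rw [key]
      cases hrest : ((pvNbrk cw (e :: t')).map (· + 1) ++ [(e :: t').length] : List Nat) with
      | nil => simp at hrest
      | cons b rs =>
        rw [pvSlices_consHead]
        have hih := ih e
        rw [List.cons_append, hrest] at hih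
        have hfirst : pvSlices (e :: t') (0 :: b :: rs) =
            ((e :: t').drop 0).take b :: pvSlices (e :: t') (b :: rs) := by
          simp [pvSlices]
        rw [hfirst, hsh] at hih
        injection hih with h1 h2
        rw [h2, hdce, if_neg (by rw [hx]; exact hc)]
        simp only [List.drop_zero] at h1 ⊢
        rw [h1]

-- bridging B's port (Int indices, PySem slice) to the Nat-level pvSlices
lemma pvBreaks_cast (cw : Int) (ds : List (Int × Int)) :
    (PySem.List.pyRange 1 (ds.length : Int) 1).filter
        (fun i => PySem.List.pyGetD (ds.map (fun d => d.1)) i 0 -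
                  PySem.List.pyGetD (ds.map (fun d => d.1)) (i - 1) 0 > cw)
      = ((pvNbrk cw ds).map (· + 1)).map (fun k : Nat => (k : Int)) := by
  rw [PySem.List.pyRange_one]
  have hm : ((ds.length : Int) - 1).toNat = ds.length - 1 := by omega
  rw [hm, List.filter_map]
  unfold pvNbrk
  rw [List.map_map]
  simp only [Function.comp_def]
  have hfun : ∀ k : Nat, (1 : Int) + (k : Int) = ((k + 1 : Nat) : Int) := by
    intro k; push_cast; ring
  have hpred : ∀ k : Nat,
      (decide (PySem.List.pyGetD (ds.map (fun d => d.1)) (1 + (k : Int)) 0 -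
               PySem.List.pyGetD (ds.map (fun d => d.1)) ((1 + (k : Int)) - 1) 0 > cw))
      = (decide ((ds.map (fun d => d.1)).getD (k + 1) 0 -
                 (ds.map (fun d => d.1)).getD k 0 > cw)) := by
    intro k
    have h2 : ((k + 1 : Nat) : Int) - 1 = ((k : Nat) : Int) := by push_cast; ring
    rw [hfun k, h2, PySem.List.pyGetD_natCast, PySem.List.pyGetD_natCast]
  rw [List.filter_congr (fun k _ => hpred k)]
  apply List.map_congr_left
  intro k _
  exact hfun k

lemma pvB_eq_chunks (cw : Int) (d : Int × Int) (t : List (Int × Int)) :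
    ((((0 : Int) :: ((PySem.List.pyRange 1 ((d :: t).length : Int) 1).filter
        (fun i => PySem.List.pyGetD ((d :: t).map (fun d => d.1)) i 0 -
                  PySem.List.pyGetD ((d :: t).map (fun d => d.1)) (i - 1) 0 > cw)) ++ [((d :: t).length : Int)]).zip
      (PySem.List.slice ((0 : Int) :: ((PySem.List.pyRange 1 ((d :: t).length : Int) 1).filter
        (fun i => PySem.List.pyGetD ((d :: t).map (fun d => d.1)) i 0 -
                  PySem.List.pyGetD ((d :: t).map (fun d => d.1)) (i - 1) 0 > cw)) ++ [((d :: t).length : Int)]) (some 1) none)).map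
      (fun p => PySem.List.slice (d :: t) (some p.1) (some p.2)))
    = pvChunks cw (d :: t) := by
  rw [pvBreaks_cast]
  rw [PySem.List.slice_from_one]
  -- the Int bounds list is the natCast image of the Nat bounds list
  have hb : ((0 : Int) :: ((pvNbrk cw (d :: t)).map (· + 1)).map (fun k : Nat => (k : Int))
        ++ [((d :: t).length : Int)])
      = ((0 :: (pvNbrk cw (d :: t)).map (· + 1) ++ [(d :: t).length]).map (fun k : Nat => (k : Int))) := by
    simp
  rw [hb]
  rw [← List.map_tail, List.zip_map]
  rw [List.map_map]
  rw [← pvSlices_eq_chunks cw t d]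
  unfold pvSlices
  apply List.map_congr_left
  intro p _
  simp only [Function.comp_def, Prod.map]
  rw [PySem.List.slice_natCast]

-- ===== VERDICT (by name: the statement is the Claim_ definition above) =====
theorem cluster_dots_into_cells_spec : Claim_equal_cluster_dots_into_cells := by
  intro dots cw ch _
  unfold Spec_cluster_dots_into_cells cluster_dots_into_cells cluster_dots_into_cells_alt
  by_cases hd : dots = []
  · simp [hd]
  · rw [if_neg hd, if_neg hd]
    have hds : PySem.List.sorted dots (fun d => d.1) false ≠ [] := by
      rw [ne_eq, PySem.List.sorted_eq_nil_iff]
      exact hd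
    cases hsort : PySem.List.sorted dots (fun d => d.1) false with
    | nil => exact absurd hsort hds
    | cons d t =>
      simp only []
      rw [pvA_eq_chunks cw d t, pvB_eq_chunks cw d t]
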